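-- pv_equiv track=rewrite | github.com/sillsdev/ptx2pdf | python/lib/ptxprint/patgen.py | format_dictionary_word
-- ===== SOURCE A (Python) =====
-- TRUE_HYPHEN = '-'
--
-- def format_dictionary_word(word, hyphens):
--     text = []
--     for i in range(len(word) + 1):
--         if i > 0:
--             text.append(word[i-1].replace(TRUE_HYPHEN, "\u2010"))
--         if i in hyphens:
--             text.append(TRUE_HYPHEN)
--     return "".join(text)
-- ===== SOURCE B (Python) =====
-- TRUE_HYPHEN = '-'
--
-- def format_dictionary_word(word, hyphens):
--     escaped = word.replace(TRUE_HYPHEN, "\u2010")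
--     cuts = [i for i in range(len(word) + 1) if i in hyphens]
--     parts = []
--     last = 0
--     for c in cuts:
--         parts.append(escaped[last:c])
--         parts.append(TRUE_HYPHEN)
--         last = c
--     parts.append(escaped[last:])
--     return "".join(parts)
-- ===== Notes on version B (the rewrite author's own statement) =====
-- stated objective: alternative
-- what changed: B escapes the whole word once with str.replace and assembles the output by slicing segments between the cut positions (collected by the same membership scan over range(len(word)+1)) and joining them, instead of interleaving character by character.
import Mathlib
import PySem

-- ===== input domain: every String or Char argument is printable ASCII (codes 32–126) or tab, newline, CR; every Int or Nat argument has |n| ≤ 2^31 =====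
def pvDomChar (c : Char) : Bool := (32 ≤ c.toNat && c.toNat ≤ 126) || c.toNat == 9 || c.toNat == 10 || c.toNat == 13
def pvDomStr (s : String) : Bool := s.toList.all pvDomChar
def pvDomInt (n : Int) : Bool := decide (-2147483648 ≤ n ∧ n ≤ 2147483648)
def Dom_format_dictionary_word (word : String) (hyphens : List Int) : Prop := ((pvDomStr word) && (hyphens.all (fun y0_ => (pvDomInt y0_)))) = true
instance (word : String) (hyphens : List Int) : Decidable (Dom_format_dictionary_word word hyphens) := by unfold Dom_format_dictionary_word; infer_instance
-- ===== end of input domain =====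

-- B escapes the word once and joins the slices between cut positions instead of
-- interleaving character by character (objective: alternative decomposition).

-- exact for the one-character strings both Pythons pass to str.replace('-', '\u2010')
def escChar (c : Char) : Char := if c = '-' then '‐' else c

-- ===== PORT A =====
-- the loop 'for i in range(len(word)+1)'; Python appends one-character strings to a
-- list and "".join-s them, which is exactly accumulating the joined character list
def aLoop (cs : List Char) (hyphens : List Int) : List Char :=
  (List.range (cs.length + 1)).foldl (fun acc i =>
    let acc1 := if 0 < i then acc ++ [escChar (cs.getD (i - 1) ' ')] else acc
    if (i : Int) ∈ hyphens then acc1 ++ ['-'] else acc1) []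

def format_dictionary_word (word : String) (hyphens : List Int) : String :=
  String.mk (aLoop word.toList hyphens)

-- ===== PORT B =====
-- cuts = [i for i in range(len(word)+1) if i in hyphens]
def bCuts (es : List Char) (hyphens : List Int) : List Nat :=
  (List.range (es.length + 1)).filter (fun i => decide ((i : Int) ∈ hyphens))

-- the 'for c in cuts' loop over (parts, last); escaped[last:c] is drop/take since
-- cuts is increasing with 0 ≤ last ≤ c ≤ len; parts are joined by concatenation
def bFold (es : List Char) (cuts : List Nat) : List Char × Nat :=
  cuts.foldl (fun st c => (st.1 ++ (es.drop st.2).take (c - st.2) ++ ['-'], c)) ([], 0)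

def format_dictionary_word_alt (word : String) (hyphens : List Int) : String :=
  let es := word.toList.map escChar
  let st := bFold es (bCuts es hyphens)
  String.mk (st.1 ++ es.drop st.2)

-- ===== PRECONDITION & SPEC =====
def Spec_format_dictionary_word (word : String) (hyphens : List Int) (out : String) : Prop := out = format_dictionary_word_alt word hyphens
instance (word : String) (hyphens : List Int) (out : String) : Decidable (Spec_format_dictionary_word word hyphens out) := by unfold Spec_format_dictionary_word; infer_instance

-- ===== CLAIM (what is proved, stated in full; the proofs are below) =====
def Claim_equal_format_dictionary_word : Prop := ∀ (word : String) (hyphens : List Int), Dom_format_dictionary_word word hyphens → Spec_format_dictionary_word word hyphens (format_dictionary_word word hyphens)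

-- ===== LEMMAS AND PROOFS =====

-- the segment interleaving both sides compute, as a recursive spec
def insH (es : List Char) (last : Nat) : List Nat → List Char
  | [] => es.drop last
  | c :: cs => (es.drop last).take (c - last) ++ '-' :: insH es c cs

-- A's loop body, per index
def gA (cs : List Char) (hyphens : List Int) (i : Nat) : List Char :=
  (if 0 < i then [escChar (cs.getD (i - 1) ' ')] else [])
    ++ (if (i : Int) ∈ hyphens then ['-'] else [])

lemma foldlA_flatMap (cs : List Char) (hyphens : List Int) :
    ∀ (l : List Nat) (acc : List Char),
    l.foldl (fun acc i =>
      let acc1 := if 0 < i then acc ++ [escChar (cs.getD (i - 1) ' ')] else acc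
      if (i : Int) ∈ hyphens then acc1 ++ ['-'] else acc1) acc
    = acc ++ l.flatMap (gA cs hyphens) := by
  intro l
  induction l with
  | nil => simp
  | cons c l ih =>
    intro acc
    simp only [List.foldl_cons, List.flatMap_cons, ih, gA]
    split_ifs <;> simp

lemma aLoop_flatMap (cs : List Char) (hyphens : List Int) :
    aLoop cs hyphens = (List.range (cs.length + 1)).flatMap (gA cs hyphens) := by
  simpa using foldlA_flatMap cs hyphens (List.range (cs.length + 1)) []

lemma foldlB_insH (es : List Char) :
    ∀ (cuts : List Nat) (acc : List Char) (last : Nat),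
    (cuts.foldl (fun (st : List Char × Nat) c =>
      (st.1 ++ (es.drop st.2).take (c - st.2) ++ ['-'], c)) (acc, last)).1
    ++ es.drop (cuts.foldl (fun (st : List Char × Nat) c =>
      (st.1 ++ (es.drop st.2).take (c - st.2) ++ ['-'], c)) (acc, last)).2
    = acc ++ insH es last cuts := by
  intro cuts
  induction cuts with
  | nil => simp [insH]
  | cons c cs ih =>
    intro acc last
    simp only [List.foldl_cons, ih, insH]
    simp

lemma bFold_insH (es : List Char) (cuts : List Nat) :
    (bFold es cuts).1 ++ es.drop (bFold es cuts).2 = insH es 0 cuts := by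
  simpa [bFold] using foldlB_insH es cuts [] 0

lemma take_succ_getD (l : List Char) (m : Nat) (h : m < l.length) :
    l.take (m + 1) = l.take m ++ [l.getD m ' '] := by
  rw [List.getD_eq_getElem l ' ' h]
  induction l generalizing m with
  | nil => simp at h
  | cons a l ih =>
    cases m with
    | zero => simp
    | succ m =>
      simp only [List.take_succ_cons, List.getElem_cons_succ, ih m (by simpa using h)]
      simp

lemma getD_drop (es : List Char) (last s : Nat) (hls : last ≤ s) (hs : s < es.length) :
    (es.drop last).getD (s - last) ' ' = es.getD s ' ' := by
  rw [List.getD_eq_getElem _ _ (by rw [List.length_drop]; omega : s - last < (es.drop last).length),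
    List.getD_eq_getElem _ _ hs, List.getElem_drop]
  congr 1
  omega

-- main bridge: segment slicing over the surviving cuts equals per-index interleaving
lemma insH_filter (es : List Char) (q : Nat → Bool) :
    ∀ (k s last : Nat), last ≤ s → s + k ≤ es.length →
    insH es last (((List.range' s k).filter (fun j => q (j + 1))).map (· + 1))
    = (es.drop last).take (s - last)
      ++ (List.range' s k).flatMap (fun j => es.getD j ' ' :: (if q (j + 1) then ['-'] else []))
      ++ es.drop (s + k) := by
  intro k
  induction k with
  | zero =>
    intro s last hls hlen
    simp only [List.range'_zero, List.filter_nil, List.map_nil, insH, List.flatMap_nil,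
      List.nil_append, Nat.add_zero, List.append_nil]
    have hd : es.drop s = (es.drop last).drop (s - last) := by
      rw [List.drop_drop]; congr 1; omega
    rw [hd]
    simpa using (List.take_append_drop (s - last) (es.drop last)).symm
  | succ k ih =>
    intro s last hls hlen
    have hs : s < es.length := by omega
    have hstep : (es.drop last).take (s + 1 - last)
        = (es.drop last).take (s - last) ++ [es.getD s ' '] := by
      have h1 : s + 1 - last = (s - last) + 1 := by omega
      rw [h1, take_succ_getD _ _ (by rw [List.length_drop]; omega), getD_drop es last s hls hs]
    have hrange : s + 1 + k = s + (k + 1) := by omega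
    rw [List.range'_succ]
    by_cases hq : q (s + 1)
    · rw [List.filter_cons, if_pos (by simpa using hq), List.map_cons]
      show (es.drop last).take (s + 1 - last) ++ '-' ::
          insH es (s + 1) (((List.range' (s + 1) k).filter (fun j => q (j + 1))).map (· + 1)) = _
      rw [ih (s + 1) (s + 1) (le_refl _) (by omega), hstep, hrange]
      simp [hq]
    · rw [List.filter_cons, if_neg (by simpa using hq)]
      rw [ih (s + 1) last (by omega) (by omega), hstep, hrange]
      simp [hq]

lemma filter_map_succ (q : Nat → Bool) (l : List Nat) :
    (l.map (· + 1)).filter q = (l.filter (fun j => q (j + 1))).map (· + 1) := by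
  induction l with
  | nil => simp
  | cons a l ih => by_cases h : q (a + 1) <;> simp [List.filter_cons, h, ih]

lemma getD_map_escChar (cs : List Char) (j : Nat) :
    (cs.map escChar).getD j ' ' = escChar (cs.getD j ' ') := by
  by_cases h : j < cs.length
  · rw [List.getD_eq_getElem _ _ (by simpa using h), List.getD_eq_getElem _ _ h, List.getElem_map]
  · have h1 : cs.length ≤ j := Nat.le_of_not_lt h
    rw [List.getD_eq_default _ _ (by simpa using h1), List.getD_eq_default _ _ h1]
    simp [escChar]

-- the combinatorial core: B's cut-slicing equals A's per-index interleaving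
lemma key (es : List Char) (q : Nat → Bool) (n : Nat) (hn : n = es.length) :
    insH es 0 ((List.range (n + 1)).filter q)
    = (List.range (n + 1)).flatMap (fun i =>
        (if 0 < i then [es.getD (i - 1) ' '] else []) ++ (if q i then ['-'] else [])) := by
  subst hn
  have hsucc : (List.range es.length).map Nat.succ = (List.range es.length).map (· + 1) := by
    simp [Nat.succ_eq_add_one]
  rw [List.range_succ_eq_map, List.filter_cons, List.flatMap_cons, hsucc, filter_map_succ]
  have hins : insH es 0 (((List.range es.length).filter (fun j => q (j + 1))).map (· + 1))
      = (List.range es.length).flatMap (fun j => es.getD j ' ' :: (if q (j + 1) then ['-'] else [])) := by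
    have := insH_filter es q es.length 0 0 (le_refl 0) (by omega)
    simpa [List.range_eq_range'] using this
  have hflat : ((List.range es.length).map (· + 1)).flatMap (fun i =>
        (if 0 < i then [es.getD (i - 1) ' '] else []) ++ (if q i then ['-'] else []))
      = (List.range es.length).flatMap (fun j => es.getD j ' ' :: (if q (j + 1) then ['-'] else [])) := by
    rw [List.flatMap_map]
    apply List.flatMap_congr
    intro j _
    simp
  by_cases h0 : q 0
  · rw [if_pos (by simpa using h0)]
    show (es.drop 0).take 0 ++ '-' :: insH es 0 _ = _
    rw [hins, hflat]
    simp [h0]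
  · rw [if_neg (by simpa using h0), hins, hflat]
    simp [h0]

-- ===== VERDICT (by name: the statement is the Claim_ definition above) =====
theorem format_dictionary_word_spec : Claim_equal_format_dictionary_word := by
  intro word hyphens _
  unfold Spec_format_dictionary_word format_dictionary_word format_dictionary_word_alt
  set cs := word.toList with hcs
  set es : List Char := cs.map escChar with hes
  set q : Nat → Bool := fun i => decide ((i : Int) ∈ hyphens) with hq
  have hlen : es.length = cs.length := by simp [hes]
  congr 1
  rw [aLoop_flatMap, bFold_insH]
  have hcuts : bCuts es hyphens = (List.range (cs.length + 1)).filter q := by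
    rw [bCuts, hlen, hq]
  rw [hcuts, key es q cs.length hlen.symm]
  apply List.flatMap_congr
  intro i _
  rw [gA, ← getD_map_escChar, ← hes, hq]
  by_cases h : (i : Int) ∈ hyphens <;> simp [h]
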